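-- pv_equiv track=rewrite | github.com/RobertoFranciscodelosSantosLopez/Collatz | distance_to_a_strongexpansive_more steps.py | analizar_distancia_y_densidad
-- ===== SOURCE A (Python) =====
-- def get_v2(n):
--     if n == 0: return 0
--     count = 0
--     while n % 2 == 0:
--         count += 1
--         n //= 2
--     return count
--
-- def collatz_steps(n):
--     steps = 0
--     curr = n
--     while curr > 1:
--         if curr % 2 == 0:
--             curr //= 2
--         else:
--             curr = (3 * curr + 1) // 2 # Usamos el paso abreviado para mayor precisión
--         steps += 1
--     return steps
--
-- def analizar_distancia_y_densidad(rango_inicio, muestras):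
--     resultados = []
--
--     for i in range(rango_inicio, rango_inicio + muestras):
--         if i % 2 == 0: continue
--
--         # Solo estudiamos a los "rebeldes" (Expansivos Débiles)
--         if get_v2(3 * i + 1) == 1:
--             pasos = collatz_steps(i)
--
--             # Buscamos la distancia al reductivo fuerte más cercano (v2 >= 3)
--             distancia = 0
--             encontrado = False
--             for d in range(2, 100, 2): # Buscamos en un radio de 100 números
--                 if get_v2(3 * (i + d) + 1) >= 3 or get_v2(3 * (i - d) + 1) >= 3:
--                     distancia = d
--                     encontrado = True
--                     break
--
--             if encontrado:
--                 resultados.append({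
--                     'n': i,
--                     'dist': distancia,
--                     'pasos': pasos
--                 })
--     return resultados
-- ===== SOURCE B (Python) =====
-- def collatz_steps(n):
--     steps = 0
--     curr = n
--     while curr > 1:
--         if curr % 2 == 0:
--             curr //= 2
--         else:
--             curr = (3 * curr + 1) // 2
--         steps += 1
--     return steps
--
-- def analizar_distancia_y_densidad(rango_inicio, muestras):
--     # Number theory replaces A's scanning and inner loops: for odd i, v2(3i+1) == 1 iff
--     # i % 4 == 3, and then i+2 or i-2 is == 5 (mod 8), i.e. v2(3(i+-2)+1) >= 3, so the
--     # nearest strong reductive is always at distance 2.  The qualifying i are thus the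
--     # arithmetic progression i == 3 (mod 4) inside the range: enumerate it directly,
--     # compute the step-count column, and assemble the records.
--     fin = rango_inicio + muestras
--     primero = rango_inicio + (3 - rango_inicio) % 4
--     candidatos = range(primero, fin, 4)
--     pasos = list(map(collatz_steps, candidatos))
--     return [{'n': i, 'dist': 2, 'pasos': p} for i, p in zip(candidatos, pasos)]
-- ===== Notes on version B (the rewrite author's own statement) =====
-- stated objective: simpler
-- what changed: B replaces A's odd/get_v2 filtering and the 49-step distance-search loop by modular arithmetic: the qualifying i are exactly i % 4 == 3 (and their distance is provably always 2), so B enumerates that arithmetic progression directly and only computes the Collatz step counts.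
import Mathlib
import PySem

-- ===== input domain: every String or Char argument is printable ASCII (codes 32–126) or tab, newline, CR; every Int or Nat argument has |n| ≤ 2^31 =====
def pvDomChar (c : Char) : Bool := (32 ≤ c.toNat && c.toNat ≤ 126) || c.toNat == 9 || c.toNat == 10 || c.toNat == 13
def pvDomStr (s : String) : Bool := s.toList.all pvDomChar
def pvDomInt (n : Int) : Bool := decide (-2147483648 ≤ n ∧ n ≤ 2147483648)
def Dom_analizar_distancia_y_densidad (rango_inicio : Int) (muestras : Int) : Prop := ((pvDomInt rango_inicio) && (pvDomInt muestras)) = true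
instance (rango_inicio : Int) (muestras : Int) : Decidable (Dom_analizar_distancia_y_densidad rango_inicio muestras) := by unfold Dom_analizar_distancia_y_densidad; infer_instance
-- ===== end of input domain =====

-- B replaces A's odd/get_v2 filtering and its 49-step distance-search loop by modular arithmetic
-- (the qualifying i are exactly i % 4 == 3 and the distance is always 2), enumerating the
-- candidate progression directly; objective: simpler, same asymptotic cost.

-- ===== PORT A =====
-- collatz_steps is textually identical in Source A and Source B, so one transliteration serves both ports.
-- Its Python 'while curr > 1' loop terminates only conjecturally (Collatz), so the port carries a
-- fuel counter and returns the steps counted so far if the fuel runs out.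
def pvCollatzLoop : Nat → Int → Int → Int
  | 0, steps, _ => steps
  | fuel + 1, steps, curr =>
    if 1 < curr then
      if PySem.Int.mod curr 2 = 0 then
        pvCollatzLoop fuel (steps + 1) (PySem.Int.floordiv curr 2)
      else
        pvCollatzLoop fuel (steps + 1) (PySem.Int.floordiv (3 * curr + 1) 2)
    else steps

def collatz_steps (n : Int) : Int := pvCollatzLoop 100000 0 n

-- get_v2's while loop; the extra 'n ≠ 0' in the guard only makes the recursion total
-- (Python reaches the loop with n ≠ 0 only, and halving an even nonzero int never yields 0).
def pvV2Loop (count : Int) (n : Int) : Int :=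
  if h : n ≠ 0 ∧ PySem.Int.mod n 2 = 0 then
    pvV2Loop (count + 1) (PySem.Int.floordiv n 2)
  else count
termination_by n.natAbs
decreasing_by
  rcases h with ⟨h1, h2⟩
  rw [PySem.Int.mod_eq_emod_of_pos (by norm_num)] at h2
  rw [PySem.Int.floordiv_eq_ediv_of_pos (by norm_num)]
  omega

def get_v2 (n : Int) : Int := if n = 0 then 0 else pvV2Loop 0 n

-- the 'for d in range(2, 100, 2): … break' search loop
def pvBuscar (i : Int) : List Int → Int × Bool
  | [] => (0, false)
  | d :: rest =>
    if 3 ≤ get_v2 (3 * (i + d) + 1) ∨ 3 ≤ get_v2 (3 * (i - d) + 1) then (d, true)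
    else pvBuscar i rest

def analizar_distancia_y_densidad (rango_inicio : Int) (muestras : Int) : List (List (String × Int)) :=
  (PySem.List.pyRange rango_inicio (rango_inicio + muestras) 1).foldl
    (fun resultados i =>
      if PySem.Int.mod i 2 = 0 then resultados
      else if get_v2 (3 * i + 1) = 1 then
        let pasos := collatz_steps i
        let p := pvBuscar i (PySem.List.pyRange 2 100 2)
        if p.2 then resultados ++ [[("n", i), ("dist", p.1), ("pasos", pasos)]] else resultados
      else resultados) []

-- ===== PORT B =====
def analizar_distancia_y_densidad_alt (rango_inicio : Int) (muestras : Int) : List (List (String × Int)) :=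
  let fin := rango_inicio + muestras
  let primero := rango_inicio + PySem.Int.mod (3 - rango_inicio) 4
  let candidatos := PySem.List.pyRange primero fin 4
  let pasos := candidatos.map collatz_steps
  (candidatos.zip pasos).map (fun ip => [("n", ip.1), ("dist", 2), ("pasos", ip.2)])

-- ===== PRECONDITION & SPEC =====
def Spec_analizar_distancia_y_densidad (rango_inicio : Int) (muestras : Int) (out : List (List (String × Int))) : Prop := out = analizar_distancia_y_densidad_alt rango_inicio muestras
instance (rango_inicio : Int) (muestras : Int) (out : List (List (String × Int))) : Decidable (Spec_analizar_distancia_y_densidad rango_inicio muestras out) := by unfold Spec_analizar_distancia_y_densidad; infer_instance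

-- ===== CLAIM (what is proved, stated in full; the proofs are below) =====
def Claim_equal_analizar_distancia_y_densidad : Prop := ∀ (rango_inicio : Int) (muestras : Int), Dom_analizar_distancia_y_densidad rango_inicio muestras → Spec_analizar_distancia_y_densidad rango_inicio muestras (analizar_distancia_y_densidad rango_inicio muestras)

-- ===== LEMMAS AND PROOFS =====

theorem pvV2Loop_ge (count n : Int) : count ≤ pvV2Loop count n := by
  rw [pvV2Loop]
  split
  · exact le_trans (by omega) (pvV2Loop_ge (count + 1) _)
  · exact le_refl _
termination_by n.natAbs
decreasing_by
  rename_i h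
  rcases h with ⟨h1, h2⟩
  rw [PySem.Int.mod_eq_emod_of_pos (by norm_num)] at h2
  rw [PySem.Int.floordiv_eq_ediv_of_pos (by norm_num)]
  omega

theorem pvV2Loop_step (count n : Int) (h0 : n ≠ 0) (h2 : n % 2 = 0) :
    pvV2Loop count n = pvV2Loop (count + 1) (n / 2) := by
  rw [pvV2Loop, dif_pos ⟨h0, by rw [PySem.Int.mod_eq_emod_of_pos (by norm_num)]; exact h2⟩,
    PySem.Int.floordiv_eq_ediv_of_pos (by norm_num)]

theorem pvV2Loop_stop (count n : Int) (h : n % 2 ≠ 0) : pvV2Loop count n = count := by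
  rw [pvV2Loop, dif_neg]
  intro hc
  exact h (by rw [← PySem.Int.mod_eq_emod_of_pos (b := 2) (by norm_num)]; exact hc.2)

theorem v2_eq_one (n : Int) (h : n % 4 = 2) : get_v2 n = 1 := by
  have h0 : n ≠ 0 := by omega
  rw [get_v2, if_neg h0, pvV2Loop_step 0 n h0 (by omega), pvV2Loop_stop _ _ (by omega)]
  norm_num

theorem v2_ne_one (n : Int) (h0 : n ≠ 0) (h : n % 4 = 0) : get_v2 n ≠ 1 := by
  have : (2 : Int) ≤ get_v2 n := by
    rw [get_v2, if_neg h0, pvV2Loop_step 0 n h0 (by omega),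
      pvV2Loop_step _ (n / 2) (by omega) (by omega)]
    exact le_trans (by norm_num) (pvV2Loop_ge _ _)
  omega

theorem v2_ge_three (n : Int) (h0 : n ≠ 0) (h : n % 8 = 0) : 3 ≤ get_v2 n := by
  rw [get_v2, if_neg h0, pvV2Loop_step 0 n h0 (by omega),
    pvV2Loop_step _ (n / 2) (by omega) (by omega),
    pvV2Loop_step _ (n / 2 / 2) (by omega) (by omega)]
  exact le_trans (by norm_num) (pvV2Loop_ge _ _)

theorem pvBuscar_two (i : Int) (h : i % 4 = 3) :
    pvBuscar i (PySem.List.pyRange 2 100 2) = (2, true) := by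
  have hr : PySem.List.pyRange 2 100 2 = 2 :: PySem.List.pyRange 4 100 2 := by decide
  rw [hr]
  show (if _ then _ else _) = _
  rw [if_pos]
  have h8 : i % 8 = 3 ∨ i % 8 = 7 := by omega
  rcases h8 with h8 | h8
  · exact Or.inl (v2_ge_three _ (by omega) (by omega))
  · exact Or.inr (v2_ge_three _ (by omega) (by omega))

-- one A-loop body application, characterised by i % 4
theorem pvStepA (acc : List (List (String × Int))) (i : Int) :
    (if PySem.Int.mod i 2 = 0 then acc
     else if get_v2 (3 * i + 1) = 1 then
       let pasos := collatz_steps i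
       let p := pvBuscar i (PySem.List.pyRange 2 100 2)
       if p.2 then acc ++ [[("n", i), ("dist", p.1), ("pasos", pasos)]] else acc
     else acc)
    = if i % 4 = 3 then acc ++ [[("n", i), ("dist", 2), ("pasos", collatz_steps i)]] else acc := by
  rw [PySem.Int.mod_eq_emod_of_pos (by norm_num)]
  by_cases h4 : i % 4 = 3
  · rw [if_neg (by omega), if_pos (v2_eq_one _ (by omega)), if_pos h4]
    simp [pvBuscar_two i h4]
  · rw [if_neg h4]
    by_cases h2 : i % 2 = 0
    · rw [if_pos h2]
    · rw [if_neg h2, if_neg (v2_ne_one _ (by omega) (by omega))]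

-- range with step 4: nil and cons forms (derived from PySem.List.pyRange_of_pos)
theorem pyRange4_nil (a b : Int) (h : b ≤ a) : PySem.List.pyRange a b 4 = [] := by
  rw [PySem.List.pyRange_of_pos a b (by norm_num), if_neg (by omega)]
  rfl

theorem pyRange4_cons (a b : Int) (h : a < b) :
    PySem.List.pyRange a b 4 = a :: PySem.List.pyRange (a + 4) b 4 := by
  rw [PySem.List.pyRange_of_pos a b (by norm_num), if_pos h,
    PySem.List.pyRange_of_pos (a + 4) b (by norm_num)]
  have hn : ((b - a + 4 - 1) / 4).toNat = ((b - (a + 4) + 4 - 1) / 4).toNat + 1 := by omega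
  have hif : (if a + 4 < b then ((b - (a + 4) + 4 - 1) / 4).toNat else 0)
      = ((b - (a + 4) + 4 - 1) / 4).toNat := by
    split
    · rfl
    · omega
  rw [hn, hif, List.range_succ_eq_map, List.map_cons, List.map_map]
  congr 1
  · norm_num
  · apply List.map_congr_left
    intro k _
    simp only [Function.comp_apply]
    push_cast
    ring

-- the main correspondence: A's filtering scan over range(a, b) equals the row map over
-- the arithmetic progression of the i ≡ 3 (mod 4) inside [a, b)
theorem pvMain (n : Nat) (a b : Int) (acc : List (List (String × Int))) (hn : (b - a).toNat ≤ n) :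
    (PySem.List.pyRange a b 1).foldl
      (fun resultados i =>
        if PySem.Int.mod i 2 = 0 then resultados
        else if get_v2 (3 * i + 1) = 1 then
          let pasos := collatz_steps i
          let p := pvBuscar i (PySem.List.pyRange 2 100 2)
          if p.2 then resultados ++ [[("n", i), ("dist", p.1), ("pasos", pasos)]] else resultados
        else resultados) acc
    = acc ++ (PySem.List.pyRange (a + PySem.Int.mod (3 - a) 4) b 4).map
        (fun i => [("n", i), ("dist", 2), ("pasos", collatz_steps i)]) := by
  induction n generalizing a acc with
  | zero =>
    have hba : b ≤ a := by omega
    rw [PySem.List.pyRange_one_eq_nil hba, List.foldl_nil,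
      pyRange4_nil _ _ (le_trans hba (by have := PySem.Int.mod_nonneg (3 - a) (b := 4) (by norm_num); omega)),
      List.map_nil, List.append_nil]
  | succ m ih =>
    by_cases hab : a < b
    · rw [PySem.List.pyRange_one_cons hab, List.foldl_cons, pvStepA acc a,
        PySem.Int.mod_eq_emod_of_pos (b := 4) (by norm_num)]
      by_cases h4 : a % 4 = 3
      · rw [if_pos h4]
        have IH := ih (a + 1) (acc ++ [[("n", a), ("dist", 2), ("pasos", collatz_steps a)]]) (by omega)
        rw [PySem.Int.mod_eq_emod_of_pos (b := 4) (by norm_num)] at IH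
        rw [IH]
        have e1 : a + (3 - a) % 4 = a := by omega
        have e2 : a + 1 + (3 - (a + 1)) % 4 = a + 4 := by omega
        rw [e1, e2, pyRange4_cons a b hab, List.map_cons, List.append_assoc]
        rfl
      · rw [if_neg h4]
        have IH := ih (a + 1) acc (by omega)
        rw [PySem.Int.mod_eq_emod_of_pos (b := 4) (by norm_num)] at IH
        rw [IH]
        have e : a + 1 + (3 - (a + 1)) % 4 = a + (3 - a) % 4 := by omega
        rw [e]
    · have hba : b ≤ a := by omega
      rw [PySem.List.pyRange_one_eq_nil hba, List.foldl_nil,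
        pyRange4_nil _ _ (le_trans hba (by have := PySem.Int.mod_nonneg (3 - a) (b := 4) (by norm_num); omega)),
        List.map_nil, List.append_nil]

-- zipping a list with its own image is mapping the pairing
theorem pvZipMap {α β : Type} (l : List α) (f : α → β) :
    l.zip (l.map f) = l.map (fun x => (x, f x)) := by
  induction l with
  | nil => rfl
  | cons x xs ih => simp [ih]

-- ===== VERDICT (by name: the statement is the Claim_ definition above) =====
theorem analizar_distancia_y_densidad_spec : Claim_equal_analizar_distancia_y_densidad := by
  intro rango_inicio muestras _
  unfold Spec_analizar_distancia_y_densidad analizar_distancia_y_densidad analizar_distancia_y_densidad_alt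
  rw [pvMain (rango_inicio + muestras - rango_inicio).toNat rango_inicio (rango_inicio + muestras) [] (by omega)]
  simp [pvZipMap, List.map_map, Function.comp]
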